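-- pv_equiv track=rewrite | github.com/acarroll031/fyp-backend | dataProcessing.py | calculate_max_consecutive_misses
-- ===== SOURCE A (Python) =====
-- def calculate_max_consecutive_misses(student_scores):
--     """
--     Calculate the maximum number of consecutive missed assessments (score of 0).
--     :param student_scores: Series, the scores of the student
--     :return int: maximum number of consecutive misses
--     """
--     max_misses = 0
--     current_misses = 0
--
--     for score in student_scores:
--         if score == 0:
--             current_misses += 1
--             max_misses = max(max_misses, current_misses)
--         else:
--             current_misses = 0
--
--     return max_misses
-- ===== SOURCE B (Python) =====
-- def calculate_max_consecutive_misses(student_scores):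
--     scores = list(student_scores)
--     n = len(scores)
--     best = 0
--     i = 0
--     while i < n:
--         if scores[i] == 0:
--             j = i + 1
--             while j < n and scores[j] == 0:
--                 j += 1
--             if j - i > best:
--                 best = j - i
--             i = j
--         else:
--             i += 1
--     return best
-- ===== Notes on version B (the rewrite author's own statement) =====
-- stated objective: alternative
-- what changed: Replaces A's single-pass running-counter-with-max accumulator by a run-skipping scan: on hitting a zero it scans the whole maximal zero run, records its length, and jumps past it; non-zero elements are skipped one by one.
import Mathlib
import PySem

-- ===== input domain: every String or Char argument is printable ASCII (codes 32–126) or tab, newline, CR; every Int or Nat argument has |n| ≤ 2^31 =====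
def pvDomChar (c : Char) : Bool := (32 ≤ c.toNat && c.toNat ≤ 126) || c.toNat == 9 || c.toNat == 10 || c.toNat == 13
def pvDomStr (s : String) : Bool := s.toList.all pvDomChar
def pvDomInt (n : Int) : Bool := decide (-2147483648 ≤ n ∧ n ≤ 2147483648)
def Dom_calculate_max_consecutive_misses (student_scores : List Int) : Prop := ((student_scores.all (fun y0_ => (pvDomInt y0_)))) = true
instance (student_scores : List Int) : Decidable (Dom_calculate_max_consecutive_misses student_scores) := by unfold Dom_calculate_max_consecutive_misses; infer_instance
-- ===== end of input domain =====

-- B replaces A's running-counter accumulator by a run-skipping scan (alternative decomposition, same cost).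

-- ===== PORT A =====
-- state = (max_misses, current_misses)
def pvStepA (st : Int × Int) (score : Int) : Int × Int :=
  if score = 0 then (max st.1 (st.2 + 1), st.2 + 1) else (st.1, 0)

def calculate_max_consecutive_misses (student_scores : List Int) : Int :=
  (student_scores.foldl pvStepA (0, 0)).1

-- ===== PORT B =====
-- inner while loop of Source B: number of leading zeros from the current position
def pvLeadZeros : List Int → Nat
  | [] => 0
  | v :: xs => if v = 0 then pvLeadZeros xs + 1 else 0

-- outer while loop of Source B: 'rest' is the suffix from index i, 'best' the accumulator
-- (fuel = list length bounds the iteration count; it only makes the recursion structural)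
def pvAltLoop (fuel : Nat) (best : Int) (l : List Int) : Int :=
  match fuel, l with
  | 0, _ => best
  | _ + 1, [] => best
  | fuel + 1, v :: xs =>
    if v = 0 then
      let j : Nat := 1 + pvLeadZeros xs
      pvAltLoop fuel (if (j : Int) > best then (j : Int) else best) (xs.drop (pvLeadZeros xs))
    else
      pvAltLoop fuel best xs

def calculate_max_consecutive_misses_alt (student_scores : List Int) : Int :=
  pvAltLoop student_scores.length 0 student_scores

-- ===== PRECONDITION & SPEC =====
def Spec_calculate_max_consecutive_misses (student_scores : List Int) (out : Int) : Prop := out = calculate_max_consecutive_misses_alt student_scores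
instance (student_scores : List Int) (out : Int) : Decidable (Spec_calculate_max_consecutive_misses student_scores out) := by unfold Spec_calculate_max_consecutive_misses; infer_instance

-- ===== CLAIM (what is proved, stated in full; the proofs are below) =====
def Claim_equal_calculate_max_consecutive_misses : Prop := ∀ (student_scores : List Int), Dom_calculate_max_consecutive_misses student_scores → Spec_calculate_max_consecutive_misses student_scores (calculate_max_consecutive_misses student_scores)

-- ===== LEMMAS AND PROOFS =====

theorem pvAltLoop_nil (fuel : Nat) (best : Int) : pvAltLoop fuel best [] = best := by
  cases fuel <;> rfl

theorem pvAltLoop_cons (fuel : Nat) (best v : Int) (xs : List Int) :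
    pvAltLoop (fuel + 1) best (v :: xs)
      = if v = 0 then
          pvAltLoop fuel (if ((1 + pvLeadZeros xs : Nat) : Int) > best then ((1 + pvLeadZeros xs : Nat) : Int) else best)
            (xs.drop (pvLeadZeros xs))
        else pvAltLoop fuel best xs := rfl

-- folding A's step through a leading zero run maximises with the run length, then continues on the remaining suffix
theorem pv_zeros_phase : ∀ (xs : List Int) (m c : Int), c ≤ m →
    List.foldl pvStepA (m, c) xs
      = List.foldl pvStepA (max m (c + pvLeadZeros xs), c + pvLeadZeros xs) (xs.drop (pvLeadZeros xs)) := by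
  intro xs
  induction xs with
  | nil =>
    intro m c h
    simp [pvLeadZeros]
    omega
  | cons v xs ih =>
    intro m c h
    by_cases hv : v = 0
    · subst hv
      have h' : c + 1 ≤ max m (c + 1) := le_max_right _ _
      have := ih (max m (c + 1)) (c + 1) h'
      simp only [pvLeadZeros, List.foldl_cons, pvStepA, if_true, List.drop_succ_cons]
      rw [this]
      have hmax : max (max m (c + 1)) (c + 1 + (pvLeadZeros xs : Int)) = max m (c + (↑(pvLeadZeros xs) + 1)) := by omega
      rw [hmax]
      push_cast
      ring_nf
    · have hmc : max m c = m := by omega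
      simp only [pvLeadZeros, Nat.cast_zero, add_zero, List.drop_zero,
        List.foldl_cons, pvStepA, if_neg hv, hmc]

-- the element just past the leading zero run (if any) is nonzero
theorem pv_drop_head : ∀ (xs : List Int),
    xs.drop (pvLeadZeros xs) = [] ∨ ∃ y ys, xs.drop (pvLeadZeros xs) = y :: ys ∧ y ≠ 0 := by
  intro xs
  induction xs with
  | nil => left; rfl
  | cons v xs ih =>
    by_cases hv : v = 0
    · subst hv
      simpa [pvLeadZeros] using ih
    · right
      exact ⟨v, xs, by simp [pvLeadZeros, hv], hv⟩

theorem pv_main : ∀ (n : Nat) (xs : List Int) (best : Int), xs.length ≤ n →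
    pvAltLoop n best xs = (List.foldl pvStepA (best, 0) xs).1 := by
  intro n
  induction n using Nat.strong_induction_on with
  | _ n ih =>
    intro xs best h
    match n, xs with
    | n, [] => simp [pvAltLoop_nil]
    | n + 1, v :: xs =>
      by_cases hv : v = 0
      · subst hv
        set k := pvLeadZeros xs with hk
        have hbest : (if ((1 + k : Nat) : Int) > best then ((1 + k : Nat) : Int) else best)
            = max best (1 + (k : Int)) := by
          push_cast; omega
        have hphase := pv_zeros_phase xs (max best 1) 1 (le_max_right _ _)
        have hmax : max (max best 1) (1 + (k : Int)) = max best (1 + (k : Int)) := by omega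
        rw [pvAltLoop_cons, if_pos rfl]
        simp only [List.foldl_cons, pvStepA, if_true, zero_add]
        rw [hphase, ← hk]
        rcases pv_drop_head xs with hnil | ⟨y, ys, heq, hy⟩
        · rw [← hk] at hnil
          rw [hnil]
          simp only [pvAltLoop_nil, List.foldl_nil, hbest]
          omega
        · rw [← hk] at heq
          rw [heq]
          have hxs : xs.length ≤ n := by simpa using h
          have hyys : (y :: ys).length ≤ xs.length := by
            rw [← heq]; simp only [List.length_drop]; omega
          obtain ⟨m, rfl⟩ : ∃ m, n = m + 1 := by
            rcases n with _ | m
            · exfalso; simp only [List.length_cons] at hyys; omega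
            · exact ⟨m, rfl⟩
          have hlen : ys.length ≤ m := by
            simp only [List.length_cons] at hyys
            omega
          simp only [List.foldl_cons, pvStepA, if_neg hy]
          rw [hbest, pvAltLoop_cons, if_neg hy,
            ih m (Nat.lt_of_lt_of_le (Nat.lt_succ_self _) (Nat.le_succ _)) ys _ hlen, ← hmax]
      · rw [pvAltLoop_cons, if_neg hv]
        simp only [List.foldl_cons, pvStepA, if_neg hv]
        exact ih n (Nat.lt_succ_self _) xs best (by simpa using h)

-- ===== VERDICT (by name: the statement is the Claim_ definition above) =====
theorem calculate_max_consecutive_misses_spec : Claim_equal_calculate_max_consecutive_misses := by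
  intro xs _
  unfold Spec_calculate_max_consecutive_misses calculate_max_consecutive_misses calculate_max_consecutive_misses_alt
  exact (pv_main xs.length xs 0 le_rfl).symm
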